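-- pv_equiv track=rewrite | github.com/TobiahRex/algorist | archive/behavior_patterns/optimizations/constraints/partitions/balanced_partition.py | balanced_partition_unsorted
-- ===== SOURCE A (Python) =====
-- import heapq
--
-- def balanced_partition_unsorted(nums, k):
--     """
--     Greedy without sorting: O(n log k) time
--
--     Faster but worse approximation quality
--     Useful when you can't modify input order (streaming data)
--     """
--     if not nums or k <= 0:
--         return 0, []
--
--     min_heap = [(0, i) for i in range(k)]
--     heapq.heapify(min_heap)
--     partitions = [[] for _ in range(k)]
--
--     for num in nums:
--         current_sum, partition_id = heapq.heappop(min_heap)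
--         partitions[partition_id].append(num)
--         heapq.heappush(min_heap, (current_sum + num, partition_id))
--
--     max_sum = max(sum(partition) for partition in partitions)
--     return max_sum, partitions
-- ===== SOURCE B (Python) =====
-- def balanced_partition_unsorted(nums, k):
--     if not nums or k <= 0:
--         return 0, []
--
--     sums = [0] * k
--     partitions = [[] for _ in range(k)]
--
--     for num in nums:
--         best = 0
--         for i in range(1, k):
--             if sums[i] < sums[best]:
--                 best = i
--         partitions[best].append(num)
--         sums[best] += num
--
--     max_sum = max(sum(partition) for partition in partitions)
--     return max_sum, partitions
-- ===== Notes on version B (the rewrite author's own statement) =====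
-- stated objective: simpler
-- what changed: Replaces the heap (heapify/heappop/heappush of (sum, id) tuples) by a plain running-sums list with an explicit first-minimum linear scan per element; same greedy assignment and identical return value.
import Mathlib
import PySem

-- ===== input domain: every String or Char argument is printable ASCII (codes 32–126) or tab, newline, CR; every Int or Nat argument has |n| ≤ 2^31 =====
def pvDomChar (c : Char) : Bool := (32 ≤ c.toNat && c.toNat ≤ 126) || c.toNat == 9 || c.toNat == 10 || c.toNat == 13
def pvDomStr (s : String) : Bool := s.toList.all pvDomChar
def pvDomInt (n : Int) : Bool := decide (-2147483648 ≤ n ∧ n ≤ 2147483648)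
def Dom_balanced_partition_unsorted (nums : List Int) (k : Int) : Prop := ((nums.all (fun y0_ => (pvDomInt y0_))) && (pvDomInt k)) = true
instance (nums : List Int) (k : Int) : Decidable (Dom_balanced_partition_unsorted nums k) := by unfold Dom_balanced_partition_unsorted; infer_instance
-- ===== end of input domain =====

-- B replaces A's heap (pop-min/push) by a plain running-sums list with an explicit
-- first-minimum scan per element; same greedy assignment, same return value.

-- ===== PORT A =====
-- Python tuple comparison (sum, id) < (sum', id'), lexicographic
def pvLexLt (a b : Int × Int) : Bool := a.1 < b.1 || (a.1 == b.1 && a.2 < b.2)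

-- heapq.heappop returns the heap's minimum under tuple order (unique here: ids are distinct);
-- the heap is held as a plain list, pop = remove the minimum, push = append (exact on outputs,
-- since only the multiset content and min-extraction of the heap are observable).
def pvHeapMin (h : Int × Int) (t : List (Int × Int)) : Int × Int :=
  t.foldl (fun m x => if pvLexLt x m then x else m) h

def pvStepA (st : List (Int × Int) × List (List Int)) (num : Int) :
    List (Int × Int) × List (List Int) :=
  match st.1 with
  | [] => st  -- unreachable: the heap always holds k > 0 entries
  | h :: t =>
    let m := pvHeapMin h t
    (((h :: t).erase m) ++ [(m.1 + num, m.2)],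
     st.2.modify m.2.toNat (fun p => p ++ [num]))  -- partition_id ∈ [0,k): nonneg, in range

def balanced_partition_unsorted (nums : List Int) (k : Int) : Int × List (List Int) :=
  if nums = [] ∨ k ≤ 0 then (0, [])
  else
    let init := ((PySem.List.pyRange 0 k 1).map (fun i => ((0:Int), i)),
                 (PySem.List.pyRange 0 k 1).map (fun _ => ([] : List Int)))
    let res := nums.foldl pvStepA init
    match PySem.List.max? (res.2.map (fun p => p.sum)) (fun x => x) with
    | some v => (v, res.2)
    | none => (0, res.2)  -- unreachable: k > 0 partitions

-- ===== PORT B =====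
-- index of the first minimum of sums, by linear scan with strict <
def pvBest (k : Int) (sums : List Int) : Int :=
  (PySem.List.pyRange 1 k 1).foldl
    (fun b i => if PySem.List.pyGetD sums i 0 < PySem.List.pyGetD sums b 0 then i else b) 0

def pvStepB (k : Int) (st : List Int × List (List Int)) (num : Int) :
    List Int × List (List Int) :=
  let best := pvBest k st.1
  (st.1.modify best.toNat (· + num),  -- best ∈ [0,k): nonneg, in range
   st.2.modify best.toNat (fun p => p ++ [num]))

def balanced_partition_unsorted_alt (nums : List Int) (k : Int) : Int × List (List Int) :=
  if nums = [] ∨ k ≤ 0 then (0, [])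
  else
    let init := (PySem.List.pyRepeat [(0:Int)] k,
                 (PySem.List.pyRange 0 k 1).map (fun _ => ([] : List Int)))
    let res := nums.foldl (pvStepB k) init
    match PySem.List.max? (res.2.map (fun p => p.sum)) (fun x => x) with
    | some v => (v, res.2)
    | none => (0, res.2)  -- unreachable: k > 0 partitions

-- ===== PRECONDITION & SPEC =====
def Spec_balanced_partition_unsorted (nums : List Int) (k : Int) (out : Int × List (List Int)) : Prop := out = balanced_partition_unsorted_alt nums k
instance (nums : List Int) (k : Int) (out : Int × List (List Int)) : Decidable (Spec_balanced_partition_unsorted nums k out) := by unfold Spec_balanced_partition_unsorted; infer_instance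

-- ===== CLAIM (what is proved, stated in full; the proofs are below) =====
def Claim_equal_balanced_partition_unsorted : Prop := ∀ (nums : List Int) (k : Int), Dom_balanced_partition_unsorted nums k → Spec_balanced_partition_unsorted nums k (balanced_partition_unsorted nums k)

-- ===== LEMMAS AND PROOFS =====

-- canonical heap content: the pairs (sums[i], i)
def pvCanon (sums : List Int) : List (Int × Int) :=
  (PySem.List.enumerate sums 0).map (fun p => (p.2, p.1))

def pvLexLe (a b : Int × Int) : Prop := a.1 < b.1 ∨ (a.1 = b.1 ∧ a.2 ≤ b.2)

theorem pvLexLt_iff (a b : Int × Int) : pvLexLt a b = true ↔ (a.1 < b.1 ∨ (a.1 = b.1 ∧ a.2 < b.2)) := by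
  simp [pvLexLt]

theorem pvLexLe_antisymm {a b : Int × Int} (h1 : pvLexLe a b) (h2 : pvLexLe b a) : a = b := by
  rcases a with ⟨a1, a2⟩; rcases b with ⟨b1, b2⟩
  simp [pvLexLe] at h1 h2
  have : a1 = b1 ∧ a2 = b2 := by omega
  simp [this.1, this.2]

theorem pvLexLe_refl (a : Int × Int) : pvLexLe a a := by simp [pvLexLe]

theorem pvLexLe_trans {a b c : Int × Int} (h1 : pvLexLe a b) (h2 : pvLexLe b c) : pvLexLe a c := by
  simp [pvLexLe] at *; omega

theorem pvLexLe_of_not_lt {a b : Int × Int} (h : ¬ pvLexLt a b = true) : pvLexLe b a := by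
  rw [pvLexLt_iff] at h; simp [pvLexLe]; omega

theorem pvLexLe_of_lt {a b : Int × Int} (h : pvLexLt a b = true) : pvLexLe a b := by
  rw [pvLexLt_iff] at h; simp [pvLexLe]; omega

theorem pvHeapMin_mem (h : Int × Int) (t : List (Int × Int)) : pvHeapMin h t ∈ h :: t := by
  induction t generalizing h with
  | nil => simp [pvHeapMin]
  | cons c t ih =>
    have : pvHeapMin h (c :: t) = pvHeapMin (if pvLexLt c h then c else h) t := rfl
    rw [this]
    split
    · rcases List.mem_cons.mp (ih c) with hm | hm <;> simp [hm]
    · rcases List.mem_cons.mp (ih h) with hm | hm <;> simp [hm]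

theorem pvHeapMin_le (h : Int × Int) (t : List (Int × Int)) :
    ∀ x ∈ h :: t, pvLexLe (pvHeapMin h t) x := by
  induction t generalizing h with
  | nil => intro x hx; simp at hx; simp [pvHeapMin, hx, pvLexLe_refl]
  | cons c t ih =>
    have hrw : pvHeapMin h (c :: t) = pvHeapMin (if pvLexLt c h then c else h) t := rfl
    have hstart : pvLexLe (pvHeapMin (if pvLexLt c h then c else h) t) (if pvLexLt c h then c else h) :=
      ih _ _ (by simp)
    have hh : pvLexLe (if pvLexLt c h then c else h) h := by
      split
      · exact pvLexLe_of_lt (by assumption)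
      · exact pvLexLe_refl h
    have hc : pvLexLe (if pvLexLt c h then c else h) c := by
      split
      · exact pvLexLe_refl c
      · exact pvLexLe_of_not_lt (by assumption)
    intro x hx
    rw [hrw]
    rcases List.mem_cons.mp hx with rfl | hx
    · exact pvLexLe_trans hstart hh
    rcases List.mem_cons.mp hx with rfl | hx
    · exact pvLexLe_trans hstart hc
    · exact ih _ _ (by simp [hx])

theorem pvCanon_length (sums : List Int) : (pvCanon sums).length = sums.length := by
  simp [pvCanon, PySem.List.length_enumerate]

theorem pvCanon_getElem (sums : List Int) (i : Nat) (hi : i < sums.length) :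
    (pvCanon sums)[i]'(by rw [pvCanon_length]; exact hi) = (sums[i], (i : Int)) := by
  simp [pvCanon, PySem.List.getElem_enumerate]

theorem pvCanon_mem_iff (sums : List Int) (p : Int × Int) :
    p ∈ pvCanon sums ↔ ∃ (i : Nat) (h : i < sums.length), p = (sums[i], (i : Int)) := by
  unfold pvCanon
  rw [List.mem_map]
  constructor
  · rintro ⟨q, hq, rfl⟩
    rw [PySem.List.mem_enumerate_iff] at hq
    obtain ⟨i, hi, rfl⟩ := hq
    exact ⟨i, hi, by simp⟩
  · rintro ⟨i, hi, rfl⟩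
    refine ⟨((i : Int), sums[i]), ?_, rfl⟩
    rw [PySem.List.mem_enumerate_iff]
    exact ⟨i, hi, by simp⟩

theorem pvBest_aux (sums : List Int) :
    ∀ m, m < sums.length →
    ∃ j : Nat,
      ((List.range m).map (fun t : Nat => (1:Int) + (t : Int))).foldl
        (fun b i => if PySem.List.pyGetD sums i 0 < PySem.List.pyGetD sums b 0 then i else b) 0
        = (j : Int) ∧ j ≤ m ∧
      (∀ i, i ≤ m → sums.getD j 0 ≤ sums.getD i 0) ∧
      (∀ i, i < j → sums.getD j 0 < sums.getD i 0) := by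
  intro m
  induction m with
  | zero =>
    intro _
    exact ⟨0, by simp, le_refl 0, fun i hi => by simp at hi; simp [hi], fun i hi => by omega⟩
  | succ m ih =>
    intro hm
    obtain ⟨j, hfold, hjm, hle, hlt⟩ := ih (by omega)
    have hcast : (1:Int) + (m : Int) = ((m + 1 : Nat) : Int) := by push_cast; ring
    rw [List.range_succ, List.map_append, List.foldl_append, hfold]
    simp only [List.map_cons, List.map_nil, List.foldl_cons, List.foldl_nil, hcast,
      PySem.List.pyGetD_natCast]
    by_cases hc : sums.getD (m + 1) 0 < sums.getD j 0
    · refine ⟨m + 1, by rw [if_pos hc], le_refl _, ?_, ?_⟩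
      · intro i hi
        rcases Nat.lt_or_ge i (m + 1) with h | h
        · exact le_of_lt (lt_of_lt_of_le hc (hle i (by omega)))
        · have : i = m + 1 := by omega
          simp [this]
      · intro i hi
        exact lt_of_lt_of_le hc (hle i (by omega))
    · refine ⟨j, by rw [if_neg hc], by omega, ?_, hlt⟩
      intro i hi
      rcases Nat.lt_or_ge i (m + 1) with h | h
      · exact hle i (by omega)
      · have hi1 : i = m + 1 := by omega
        rw [hi1]; omega

-- pvBest's first-argmin characterisation
theorem pvBest_spec (sums : List Int) (hne : sums ≠ []) :
    ∃ j : Nat, pvBest (sums.length : Int) sums = (j : Int) ∧ j < sums.length ∧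
      (∀ i, i < sums.length → sums.getD j 0 ≤ sums.getD i 0) ∧
      (∀ i, i < j → sums.getD j 0 < sums.getD i 0) := by
  have hlen : 0 < sums.length := List.length_pos_iff.mpr hne
  obtain ⟨j, hfold, hjm, hle, hlt⟩ := pvBest_aux sums (sums.length - 1) (by omega)
  refine ⟨j, ?_, by omega, fun i hi => hle i (by omega), hlt⟩
  unfold pvBest
  rw [PySem.List.pyRange_one]
  have : ((sums.length : Int) - 1).toNat = sums.length - 1 := by omega
  rw [this]
  exact hfold

-- generic: erase of the element at position j equals eraseIdx j when no earlier copy exists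
theorem pv_erase_eq_eraseIdx {α : Type} [BEq α] [LawfulBEq α] :
    ∀ (l : List α) (j : Nat) (a : α) (hj : j < l.length),
      l[j] = a → (∀ i (hi : i < j), l[i]'(by omega) ≠ a) → l.erase a = l.eraseIdx j := by
  intro l
  induction l with
  | nil => intro j a hj; simp at hj
  | cons h t ih =>
    intro j a hj hget hpre
    cases j with
    | zero =>
      simp at hget
      simp [hget, List.erase_cons_head]
    | succ j =>
      have hne : h ≠ a := hpre 0 (by omega)
      rw [List.erase_cons_tail (by simp [hne]), List.eraseIdx_cons_succ]
      congr 1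
      exact ih j a (by simp at hj; omega) (by simpa using hget)
        (fun i hi => hpre (i + 1) (by omega))

-- generic: removing position j then appending x is a permutation of setting position j to x
theorem pv_eraseIdx_append_perm {α : Type} :
    ∀ (l : List α) (j : Nat), j < l.length → ∀ x, (l.eraseIdx j ++ [x]).Perm (l.set j x) := by
  intro l
  induction l with
  | nil => intro j hj; simp at hj
  | cons h t ih =>
    intro j hj x
    cases j with
    | zero => simpa using (List.perm_append_singleton x t)
    | succ j =>
      simp only [List.eraseIdx_cons_succ, List.set_cons_succ, List.cons_append]
      exact (ih j (by simpa using hj) x).cons h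

theorem pvCanon_modify (sums : List Int) (j : Nat) (hj : j < sums.length) (f : Int → Int) :
    pvCanon (sums.modify j f) = (pvCanon sums).set j (f sums[j], (j : Int)) := by
  apply List.ext_getElem
  · simp [pvCanon_length]
  · intro i h1 h2
    have hi : i < sums.length := by
      have := h1; rw [pvCanon_length, List.length_modify] at this; exact this
    rw [pvCanon_getElem (sums.modify j f) i (by simpa using hi)]
    rw [List.getElem_set]
    by_cases hij : j = i
    · subst hij
      simp [List.getElem_modify]
    · rw [if_neg hij, pvCanon_getElem sums i hi]
      simp only [List.getElem_modify]
      rw [if_neg hij]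

-- the single loop step: same partitions update, heap stays a permutation of pvCanon of sums
theorem pvStepA_cons (h : Int × Int) (t : List (Int × Int)) (parts : List (List Int)) (num : Int) :
    pvStepA (h :: t, parts) num =
      (((h :: t).erase (pvHeapMin h t)) ++ [((pvHeapMin h t).1 + num, (pvHeapMin h t).2)],
       parts.modify (pvHeapMin h t).2.toNat (fun p => p ++ [num])) := rfl

theorem pvStepB_def (k : Int) (sums : List Int) (parts : List (List Int)) (num : Int) :
    pvStepB k (sums, parts) num =
      (sums.modify (pvBest k sums).toNat (· + num),
       parts.modify (pvBest k sums).toNat (fun p => p ++ [num])) := rfl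

theorem pv_step_sim (num : Int) (heap : List (Int × Int)) (sums : List Int)
    (parts : List (List Int)) (hne : sums ≠ []) (hperm : heap.Perm (pvCanon sums)) :
    (pvStepA (heap, parts) num).2 = (pvStepB (sums.length : Int) (sums, parts) num).2 ∧
    (pvStepA (heap, parts) num).1.Perm (pvCanon (pvStepB (sums.length : Int) (sums, parts) num).1) ∧
    (pvStepB (sums.length : Int) (sums, parts) num).1.length = sums.length := by
  obtain ⟨j, hbest, hjlt, hle, hlt⟩ := pvBest_spec sums hne
  have hgd : ∀ (i : Nat) (hi : i < sums.length), sums.getD i 0 = sums[i]'hi := by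
    intro i hi
    simp [List.getD_eq_getElem?_getD, List.getElem?_eq_getElem hi]
  obtain ⟨h, t, rfl⟩ : ∃ h t, heap = h :: t := by
    cases heap with
    | nil =>
      exfalso
      have hlen0 := hperm.length_eq
      rw [pvCanon_length] at hlen0
      cases sums with
      | nil => exact hne rfl
      | cons a l => simp at hlen0
    | cons h t => exact ⟨h, t, rfl⟩
  have hmem_iff : ∀ x : Int × Int, x ∈ (h :: t) ↔ x ∈ pvCanon sums := fun x => hperm.mem_iff
  have htarget_mem : ((sums[j]'hjlt, (j : Int)) : Int × Int) ∈ pvCanon sums :=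
    (pvCanon_mem_iff _ _).mpr ⟨j, hjlt, rfl⟩
  have hmin_mem : pvHeapMin h t ∈ pvCanon sums := (hmem_iff _).mp (pvHeapMin_mem h t)
  obtain ⟨i, hilt, hmi⟩ := (pvCanon_mem_iff _ _).mp hmin_mem
  have h1 : pvLexLe (pvHeapMin h t) (sums[j]'hjlt, (j : Int)) :=
    pvHeapMin_le h t _ ((hmem_iff _).mpr htarget_mem)
  have h2 : pvLexLe ((sums[j]'hjlt, (j : Int)) : Int × Int) (pvHeapMin h t) := by
    rw [hmi]
    simp only [pvLexLe]
    rcases lt_trichotomy i j with hij | rfl | hij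
    · have := hlt i hij
      rw [hgd i (lt_trans hij hjlt), hgd j hjlt] at this
      exact Or.inl this
    · exact Or.inr ⟨rfl, le_refl _⟩
    · have := hle i hilt
      rw [hgd i hilt, hgd j hjlt] at this
      rcases lt_or_eq_of_le this with hlt' | heq
      · exact Or.inl hlt'
      · exact Or.inr ⟨heq, by exact_mod_cast Nat.le_of_lt hij⟩
  have hmval : pvHeapMin h t = (sums[j]'hjlt, (j : Int)) := pvLexLe_antisymm h1 h2
  have hbtoNat : (pvBest (sums.length : Int) sums).toNat = j := by rw [hbest]; simp
  refine ⟨?_, ?_, ?_⟩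
  · rw [pvStepA_cons, pvStepB_def, hmval, hbtoNat]
    simp
  · rw [pvStepA_cons, pvStepB_def, hbtoNat]
    simp only []
    have herase : (pvCanon sums).erase (pvHeapMin h t) = (pvCanon sums).eraseIdx j := by
      apply pv_erase_eq_eraseIdx (pvCanon sums) j (pvHeapMin h t)
        (by rw [pvCanon_length]; exact hjlt)
      · rw [pvCanon_getElem sums j hjlt, hmval]
      · intro i' hi'
        rw [pvCanon_getElem sums i' (lt_trans hi' hjlt), hmval]
        intro hcontra
        have : (i' : Int) = (j : Int) := congrArg Prod.snd hcontra
        omega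
    have e1 : ((h :: t).erase (pvHeapMin h t)).Perm ((pvCanon sums).eraseIdx j) := by
      rw [← herase]; exact hperm.erase _
    have e2 := e1.append_right [((pvHeapMin h t).1 + num, (pvHeapMin h t).2)]
    have e3 := pv_eraseIdx_append_perm (pvCanon sums) j (by rw [pvCanon_length]; exact hjlt)
      ((pvHeapMin h t).1 + num, (pvHeapMin h t).2)
    refine (e2.trans e3).trans ?_
    rw [pvCanon_modify sums j hjlt (· + num), hmval]
  · rw [pvStepB_def]
    simp [List.length_modify]

theorem pv_loop_sim (k : Int) (hk : 0 < k) :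
    ∀ (ns : List Int) (heap : List (Int × Int)) (sums : List Int) (parts : List (List Int)),
      sums.length = k.toNat → heap.Perm (pvCanon sums) →
      (ns.foldl pvStepA (heap, parts)).2 = (ns.foldl (pvStepB k) (sums, parts)).2 := by
  intro ns
  induction ns with
  | nil => intro heap sums parts _ _; rfl
  | cons num ns ih =>
    intro heap sums parts hlen hperm
    have hne : sums ≠ [] := by
      intro h; rw [h] at hlen; simp at hlen; omega
    have hkL : (sums.length : Int) = k := by rw [hlen]; omega
    obtain ⟨hp, hpm, hlen2⟩ := pv_step_sim num heap sums parts hne hperm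
    rw [hkL] at hp hpm hlen2
    rw [List.foldl_cons, List.foldl_cons]
    have hA : pvStepA (heap, parts) num =
        ((pvStepA (heap, parts) num).1, (pvStepB k (sums, parts) num).2) := by
      rw [← hp]
    have hB : pvStepB k (sums, parts) num =
        ((pvStepB k (sums, parts) num).1, (pvStepB k (sums, parts) num).2) := rfl
    rw [hA, hB]
    exact ih _ _ _ (by rw [hlen2, hlen]) hpm

theorem pv_init_eq (k : Int) (_hk : 0 < k) :
    (PySem.List.pyRange 0 k 1).map (fun i => ((0:Int), i)) = pvCanon (PySem.List.pyRepeat [(0:Int)] k) := by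
  rw [PySem.List.pyRepeat_singleton]
  apply List.ext_getElem
  · simp [pvCanon_length, PySem.List.length_pyRange_one]
  · intro i h1 h2
    have hi : i < k.toNat := by
      simpa [PySem.List.length_pyRange_one] using h1
    rw [pvCanon_getElem (List.replicate k.toNat (0:Int)) i (by simpa using hi)]
    simp [PySem.List.getElem_pyRange_one]

-- ===== VERDICT (by name: the statement is the Claim_ definition above) =====
theorem balanced_partition_unsorted_spec : Claim_equal_balanced_partition_unsorted := by
  intro nums k _
  unfold Spec_balanced_partition_unsorted balanced_partition_unsorted balanced_partition_unsorted_alt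
  by_cases hg : nums = [] ∨ k ≤ 0
  · simp [hg]
  · simp only [if_neg hg]
    push Not at hg
    have hk : 0 < k := by omega
    have hlen : (PySem.List.pyRepeat [(0:Int)] k).length = k.toNat := by
      simp [PySem.List.pyRepeat_singleton]
    have hperm : ((PySem.List.pyRange 0 k 1).map (fun i => ((0:Int), i))).Perm
        (pvCanon (PySem.List.pyRepeat [(0:Int)] k)) := by
      rw [pv_init_eq k hk]
    have := pv_loop_sim k hk nums _ _ ((PySem.List.pyRange 0 k 1).map (fun _ => ([] : List Int))) hlen hperm
    simp only [this]
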